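-- pv_equiv track=rewrite | github.com/marcoslers/Bioinformatics | ADN_ARN/main.py | get_proteins
-- ===== SOURCE A (Python) =====
-- amino_acids_table ={'ALA':'A','CYS':'C','ASP':'D','GLU':'E','PHE':'F',
--                     'GLY':'G','HIS':'H','ILE':'I','LYS':'K','LEU':'L',
--                     'MET':'M','ASN':'N','PRO':'P','GLN':'Q','ARG':'R',
--                     'SER':'S','THR':'T','VAL':'V','TRP':'W','TYR':'Y'}
--
-- def get_proteins(aminoacids):
--     protein=''
--     proteins=[]
--     for amn in aminoacids:
--         if  amn=='UAA' or amn=='UAG' or amn=='UGA':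
--             proteins.append(protein)
--             protein=''
--         else:
--             protein+=amino_acids_table.get(amn)
--     return proteins
-- ===== SOURCE B (Python) =====
-- _CODONS = ('ALA', 'CYS', 'ASP', 'GLU', 'PHE', 'GLY', 'HIS', 'ILE', 'LYS', 'LEU',
--            'MET', 'ASN', 'PRO', 'GLN', 'ARG', 'SER', 'THR', 'VAL', 'TRP', 'TYR')
-- _LETTERS = 'ACDEFGHIKLMNPQRSTVWY'
-- _TABLE = dict(zip(_CODONS, _LETTERS))
--
--
-- def get_proteins(aminoacids):
--     # Phase 1: indices of the stop codons.
--     stops = [i for i, c in enumerate(aminoacids) if c in ('UAA', 'UAG', 'UGA')]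
--     # Phase 2: slice out and translate each chunk between consecutive stops.
--     starts = [0] + [i + 1 for i in stops]
--     chunks = [''.join(_TABLE[c] for c in aminoacids[a:b])
--               for a, b in zip(starts, stops + [len(aminoacids)])]
--     # The unfinished chunk after the last stop is dropped.
--     return chunks[:-1]
-- ===== Notes on version B (the rewrite author's own statement) =====
-- stated objective: alternative
-- what changed: Replaces A's single interleaved accumulate-and-flush loop by staged passes: collect the indices of the stop codons with enumerate, slice the input into the chunks between consecutive stops via zip of start/stop index lists, translate each chunk wholesale with join, and drop the unfinished trailing chunk.
import Mathlib
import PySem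

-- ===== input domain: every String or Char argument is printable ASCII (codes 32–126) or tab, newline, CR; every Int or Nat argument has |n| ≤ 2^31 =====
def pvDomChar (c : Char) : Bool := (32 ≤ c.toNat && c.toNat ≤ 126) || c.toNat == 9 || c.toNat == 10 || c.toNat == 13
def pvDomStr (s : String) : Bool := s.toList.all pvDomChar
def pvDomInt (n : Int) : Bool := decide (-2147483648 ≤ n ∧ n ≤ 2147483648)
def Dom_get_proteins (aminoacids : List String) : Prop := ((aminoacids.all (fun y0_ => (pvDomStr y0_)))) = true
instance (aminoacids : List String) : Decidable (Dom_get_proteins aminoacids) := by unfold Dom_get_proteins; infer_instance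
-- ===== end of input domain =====

-- B replaces A's interleaved accumulate-and-flush loop by staged passes: collect stop-codon
-- indices, slice out the group before each stop, translate each group wholesale (objective: alternative).

-- ===== PORT A =====
def amino_acids_table : PySem.Dict String String := PySem.Dict.ofList
  [("ALA","A"),("CYS","C"),("ASP","D"),("GLU","E"),("PHE","F"),
   ("GLY","G"),("HIS","H"),("ILE","I"),("LYS","K"),("LEU","L"),
   ("MET","M"),("ASN","N"),("PRO","P"),("GLN","Q"),("ARG","R"),
   ("SER","S"),("THR","T"),("VAL","V"),("TRP","W"),("TYR","Y")]

def isStop (s : String) : Bool := s == "UAA" || s == "UAG" || s == "UGA"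

-- 'protein += amino_acids_table.get(amn)': Python raises TypeError when the codon is missing;
-- the port uses getD "" there and Pre_ excludes exactly those inputs.
def stepA (st : String × List String) (amn : String) : String × List String :=
  if isStop amn then ("", st.2 ++ [st.1])
  else (st.1 ++ (amino_acids_table.get? amn).getD "", st.2)

def get_proteins (aminoacids : List String) : List String :=
  (aminoacids.foldl stepA ("", [])).2

-- ===== PORT B =====
-- B's module context: _TABLE = dict(zip(_CODONS, _LETTERS)) — the letters of the string are the
-- values, each a one-character string.
def bCodons : List String :=
  ["ALA","CYS","ASP","GLU","PHE","GLY","HIS","ILE","LYS","LEU",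
   "MET","ASN","PRO","GLN","ARG","SER","THR","VAL","TRP","TYR"]
def bLetters : String := "ACDEFGHIKLMNPQRSTVWY"
def bTable : PySem.Dict String String :=
  PySem.Dict.ofList (bCodons.zip (bLetters.toList.map (fun c => String.ofList [c])))

-- '_TABLE[c]' raises KeyError when the codon is missing; the port uses getD "" there and
-- Pre_ excludes those inputs (A raises on them too).
def get_proteins_alt (aminoacids : List String) : List String :=
  let stops : List Int :=
    ((PySem.List.enumerate aminoacids 0).filter
        (fun p => ["UAA","UAG","UGA"].contains p.2)).map (fun p => p.1)
  let starts : List Int := 0 :: stops.map (fun i => i + 1)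
  let chunks := (starts.zip (stops ++ [(aminoacids.length : Int)])).map
    (fun ab => PySem.Str.join ""
      ((PySem.List.slice aminoacids (some ab.1) (some ab.2)).map
        (fun c => (bTable.get? c).getD "")))
  PySem.List.slice chunks none (some (-1))

-- ===== PRECONDITION & SPEC =====
-- Pre_ excludes exactly the inputs on which Python A raises TypeError: a codon that is neither
-- a stop codon nor a key of amino_acids_table.
def Pre_get_proteins (aminoacids : List String) : Prop :=
  ∀ a ∈ aminoacids, isStop a = true ∨ (amino_acids_table.get? a).isSome = true
instance (aminoacids : List String) : Decidable (Pre_get_proteins aminoacids) := by unfold Pre_get_proteins; infer_instance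

def pvWitness_get_proteins : List String := ["MET", "GLY", "UAA", "ALA", "UGA", "PHE"]

def Spec_get_proteins (aminoacids : List String) (out : List String) : Prop := out = get_proteins_alt aminoacids
instance (aminoacids : List String) (out : List String) : Decidable (Spec_get_proteins aminoacids out) := by unfold Spec_get_proteins; infer_instance

-- ===== CLAIM =====
def Claim_equal_get_proteins : Prop := ∀ (aminoacids : List String), Dom_get_proteins aminoacids → Pre_get_proteins aminoacids → Spec_get_proteins aminoacids (get_proteins aminoacids)

-- ===== LEMMAS AND PROOFS =====

-- the letter appended for a codon, and the translation of a whole group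
def tr (c : String) : String := (amino_acids_table.get? c).getD ""

def trSeg (g : List String) : String := PySem.Str.join "" (g.map tr)

-- the canonical recursive split on the first stop codon (proof-side reference shape)
def altGo (proteins : List String) (rest : List String) : List String :=
  match h : rest.findIdx? isStop with
  | none => proteins
  | some i => altGo (proteins ++ [trSeg (rest.take i)]) (rest.drop (i + 1))
termination_by rest.length
decreasing_by
  have hi := (List.findIdx?_eq_some_iff_getElem.mp h).1
  simp [List.length_drop]; omega

-- stop-codon indices, in Nat form (proof-side image of B's phase 1)
def nStops : List String → List Nat
  | [] => []
  | x :: t => if isStop x then 0 :: (nStops t).map (· + 1) else (nStops t).map (· + 1)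

-- B's phase-2 groups, in Nat form
def nGroups (xs : List String) : List (List String) :=
  ((0 :: (nStops xs).map (· + 1)).zip (nStops xs)).map
    (fun ab => (xs.drop ab.1).take (ab.2 - ab.1))

theorem stopsB_eq (x : String) : (["UAA","UAG","UGA"].contains x) = isStop x := by
  simp only [isStop, List.contains_cons, List.contains_nil, Bool.or_false, Bool.or_assoc]

theorem trSeg_nil : trSeg [] = "" := by decide

theorem join_empty_cons (cs : List Char) (l : List (List Char)) :
    PySem.Chars.join [] (cs :: l) = cs ++ PySem.Chars.join [] l := by
  cases l with
  | nil => simp [PySem.Chars.join_singleton]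
  | cons b t => rw [PySem.Chars.join_cons_cons]; simp

theorem trSeg_cons (x : String) (g : List String) :
    trSeg (x :: g) = tr x ++ trSeg g := by
  apply String.toList_inj.mp
  simp [trSeg, PySem.Str.join, join_empty_cons]

theorem altGo_eq (acc rest : List String) :
    altGo acc rest = (match rest.findIdx? isStop with
                      | none => acc
                      | some i => altGo (acc ++ [trSeg (rest.take i)]) (rest.drop (i + 1))) := by
  rw [altGo]
  cases h : rest.findIdx? isStop <;> rfl

theorem altGo_acc (rest : List String) (acc : List String) :
    altGo acc rest = acc ++ altGo [] rest := by
  rw [altGo_eq acc rest, altGo_eq [] rest]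
  cases h : rest.findIdx? isStop with
  | none => simp
  | some i =>
    dsimp only
    rw [altGo_acc (rest.drop (i + 1)) (acc ++ [trSeg (rest.take i)]),
        altGo_acc (rest.drop (i + 1)) ([] ++ [trSeg (rest.take i)])]
    simp
termination_by rest.length
decreasing_by
  all_goals
    have hi := (List.findIdx?_eq_some_iff_getElem.mp h).1
    simp [List.length_drop]; omega

-- the invariant of A's fold, expressed through altGo
theorem foldA_eq (rest : List String) (p : String) (acc : List String) :
    (rest.foldl stepA (p, acc)).2 =
      acc ++ (match rest.findIdx? isStop with
              | none => []
              | some i => (p ++ trSeg (rest.take i)) :: altGo [] (rest.drop (i + 1))) := by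
  induction rest generalizing p acc with
  | nil => simp
  | cons x rest ih =>
    rw [List.foldl_cons, List.findIdx?_cons]
    by_cases hx : isStop x
    · have hs : stepA (p, acc) x = ("", acc ++ [p]) := by simp [stepA, hx]
      rw [hs, ih]
      simp only [hx, if_true, List.drop_succ_cons, List.drop_zero, List.take_zero]
      cases h : rest.findIdx? isStop with
      | none => simp [trSeg_nil, altGo_eq [] rest, h]
      | some i =>
        dsimp only
        rw [altGo_eq [] rest, h]
        dsimp only
        simp only [List.nil_append]
        rw [altGo_acc (rest.drop (i + 1)) [trSeg (rest.take i)]]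
        simp [trSeg_nil, String.empty_append]
    · have hs : stepA (p, acc) x = (p ++ tr x, acc) := by simp [stepA, hx, tr]
      rw [hs, ih]
      simp only [hx, Bool.false_eq_true, if_false]
      cases h : rest.findIdx? isStop with
      | none => simp
      | some i =>
        simp [List.take_succ_cons, trSeg_cons, String.append_assoc]

-- B's phase 1: enumerate + filter + fst is the cast of nStops
theorem enumFilter_eq (xs : List String) (s : Int) :
    ((PySem.List.enumerate xs s).filter
        (fun p => ["UAA","UAG","UGA"].contains p.2)).map (fun p => p.1)
      = (nStops xs).map (fun n : Nat => s + (n : Int)) := by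
  induction xs generalizing s with
  | nil => simp [PySem.List.enumerate_nil, nStops]
  | cons x t ih =>
    rw [PySem.List.enumerate_cons, List.filter_cons]
    by_cases hx : isStop x
    · have hc : (["UAA","UAG","UGA"].contains x) = true := by rw [stopsB_eq]; exact hx
      simp only [hc, if_true, List.map_cons, ih, nStops, hx]
      refine congrArg₂ List.cons (by simp) ?_
      rw [List.map_map]
      refine List.map_congr_left fun n _ => ?_
      simp only [Function.comp_apply]
      push_cast; ring
    · have hc : (["UAA","UAG","UGA"].contains x) = false := by rw [stopsB_eq]; simpa using hx
      simp only [hc, Bool.false_eq_true, if_false, ih, nStops, hx]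
      rw [List.map_map]
      refine List.map_congr_left fun n _ => ?_
      simp only [Function.comp_apply]
      push_cast; ring

-- nStops via the first stop codon
theorem nStops_of_none (xs : List String) (h : xs.findIdx? isStop = none) :
    nStops xs = [] := by
  induction xs with
  | nil => rfl
  | cons x t ih =>
    rw [List.findIdx?_cons] at h
    by_cases hx : isStop x
    · simp [hx] at h
    · simp only [hx, Bool.false_eq_true, if_false, Option.map_eq_none_iff] at h
      simp [nStops, hx, ih h]

theorem nStops_of_some (xs : List String) (i : Nat) (h : xs.findIdx? isStop = some i) :
    nStops xs = i :: (nStops (xs.drop (i + 1))).map (· + (i + 1)) := by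
  induction xs generalizing i with
  | nil => simp [List.findIdx?_nil] at h
  | cons x t ih =>
    rw [List.findIdx?_cons] at h
    by_cases hx : isStop x
    · simp only [hx, if_true] at h
      cases h
      simp [nStops, hx]
    · simp only [hx, Bool.false_eq_true, if_false] at h
      rcases Option.map_eq_some_iff.mp h with ⟨j, hj, rfl⟩
      rw [List.drop_succ_cons]
      simp only [nStops, hx, Bool.false_eq_true, if_false, ih j hj, List.map_cons]
      refine congrArg₂ List.cons rfl ?_
      rw [List.map_map]
      refine List.map_congr_left fun n _ => ?_
      simp only [Function.comp_apply]
      omega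

-- B's phase 2+3 over Nat indices equals the recursive split
theorem nGroups_trSeg : ∀ (N : Nat) (xs : List String), xs.length ≤ N →
    (nGroups xs).map trSeg = altGo [] xs := by
  intro N
  induction N with
  | zero =>
    intro xs h
    have hxs : xs = [] := List.length_eq_zero_iff.mp (Nat.le_zero.mp h)
    subst hxs
    have h1 : nGroups ([] : List String) = [] := by simp [nGroups, nStops]
    have h2 : altGo [] [] = [] := by rw [altGo_eq]; simp
    rw [h1, h2]; rfl
  | succ N ih =>
    intro xs h
    rw [altGo_eq]
    cases hf : xs.findIdx? isStop with
    | none => simp [nGroups, nStops_of_none xs hf]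
    | some i =>
      have hi : i < xs.length := (List.findIdx?_eq_some_iff_getElem.mp hf).1
      dsimp only
      rw [altGo_acc]
      have hstep : nGroups xs = xs.take i :: nGroups (xs.drop (i + 1)) := by
        set ns := nStops (xs.drop (i + 1)) with hns
        rw [nGroups, nStops_of_some xs i hf, ← hns]
        simp only [List.map_cons, List.zip_cons_cons, List.map_cons]
        refine congrArg₂ List.cons (by simp) ?_
        have h1 : (ns.map (· + (i + 1))).map (· + 1) = (ns.map (· + 1)).map (· + (i + 1)) := by
          rw [List.map_map, List.map_map]
          exact List.map_congr_left fun n _ => by simp only [Function.comp_apply]; omega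
        rw [h1]
        have h2 : ((i + 1) : Nat) :: (ns.map (· + 1)).map (· + (i + 1))
            = (0 :: ns.map (· + 1)).map (· + (i + 1)) := by simp
        rw [h2, List.zip_map, List.map_map, nGroups, ← hns]
        refine List.map_congr_left fun ab _ => ?_
        simp only [Function.comp_apply, Prod.map_fst, Prod.map_snd]
        rw [List.drop_drop]
        exact congrArg₂ List.take (by omega) (congrArg (fun k => xs.drop k) (by omega))
      rw [hstep, List.map_cons, ih (xs.drop (i + 1)) (by simp [List.length_drop]; omega)]
      rfl

-- B's table is A's table
theorem bTable_eq : bTable = amino_acids_table := by decide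

-- the Int-indexed port collapses onto the Nat-indexed nGroups
theorem zip_append_singleton_dropLast {α β : Type} (l1 : List α) (l2 : List β) (y : β)
    (h : l1.length = l2.length + 1) : (l1.zip (l2 ++ [y])).dropLast = l1.zip l2 := by
  induction l2 generalizing l1 with
  | nil =>
    match l1, h with
    | [a], _ => simp
  | cons b l2 ih =>
    match l1, h with
    | a :: t, h =>
      simp only [List.cons_append, List.zip_cons_cons]
      have hne : t.zip ((l2 ++ [y])) ≠ [] := by
        have : t.length = l2.length + 1 := by simpa using h
        cases t with
        | nil => simp at this
        | cons c u => cases l2 <;> simp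
      rw [List.dropLast_cons_of_ne_nil hne, ih t (by simpa using h)]

theorem map_dropLast_comm {α β : Type} (f : α → β) (l : List α) :
    (l.map f).dropLast = l.dropLast.map f := by
  rw [List.dropLast_eq_take, List.dropLast_eq_take, List.length_map, ← List.map_take]

theorem alt_eq_nGroups (xs : List String) :
    get_proteins_alt xs = (nGroups xs).map trSeg := by
  simp only [get_proteins_alt, enumFilter_eq xs 0, bTable_eq]
  have hcast : (nStops xs).map (fun n : Nat => (0 : Int) + (n : Int))
      = (nStops xs).map (fun n : Nat => (n : Int)) :=
    List.map_congr_left fun n _ => by simp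
  rw [hcast]
  have hstarts : ((0 : Int) :: ((nStops xs).map (fun n : Nat => (n : Int))).map (fun i => i + 1))
      = (0 :: (nStops xs).map (· + 1)).map (fun n : Nat => (n : Int)) := by
    rw [List.map_map, List.map_cons]
    refine congrArg₂ List.cons (by simp) ?_
    rw [List.map_map]
    refine List.map_congr_left fun n _ => ?_
    simp only [Function.comp_apply]
    push_cast; ring
  have hstop : (nStops xs).map (fun n : Nat => (n : Int)) ++ [(xs.length : Int)]
      = ((nStops xs) ++ [xs.length]).map (fun n : Nat => (n : Int)) := by
    rw [List.map_append]; rfl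
  rw [hstarts, hstop, List.zip_map, List.map_map, PySem.List.slice_to_neg_one,
      map_dropLast_comm,
      zip_append_singleton_dropLast _ _ _ (by simp),
      nGroups, List.map_map]
  refine List.map_congr_left fun ab _ => ?_
  simp only [Function.comp_apply, Prod.map_fst, Prod.map_snd]
  rw [PySem.List.slice_natCast]
  rfl

-- ===== VERDICT =====
theorem get_proteins_spec : Claim_equal_get_proteins := by
  intro xs _ _
  show get_proteins xs = get_proteins_alt xs
  rw [get_proteins, alt_eq_nGroups, nGroups_trSeg xs.length xs le_rfl, foldA_eq, altGo_eq [] xs]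
  cases h : xs.findIdx? isStop with
  | none => simp
  | some i =>
    dsimp only
    simp only [List.nil_append]
    rw [altGo_acc (xs.drop (i + 1)) [trSeg (xs.take i)]]
    simp [String.empty_append]
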